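-- pv_equiv track=rewrite | github.com/hellonlp/sentence_segmentation_dl | utils.py | cut_by_index
-- ===== SOURCE A (Python) =====
-- def cut_by_index(List, indexs):
--     """
--     List: a list of data
--     indexs: a list of indexs
--     """
--     inds, ind = [], []
--     length = len(List)
--     for i, l in enumerate(List):
--         if l not in indexs:
--             ind.append(l)
--             if i == length - 1:
--                 inds.append(ind)
--         else:
--             if ind != []:
--                 inds.append(ind)
--             ind = []
--     return inds
-- ===== SOURCE B (Python) =====
-- def cut_by_index(List, indexs):
--     out = []
--     rest = List
--     while rest:
--         if rest[0] in indexs: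
--             rest = rest[1:]
--         else:
--             seg = []
--             while rest and rest[0] not in indexs:
--                 seg.append(rest[0])
--                 rest = rest[1:]
--             out.append(seg)
--     return out
-- ===== Notes on version B (the rewrite author's own statement) =====
-- stated objective: alternative
-- what changed: A is a single-pass accumulator/flush state machine over enumerate(List) with a special last-index check; B repeatedly skips delimiter heads and extracts each maximal non-delimiter run from the front of the remaining list (skip/span two-phase scan), never tracking indices or pending-flush state.
import Mathlib
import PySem

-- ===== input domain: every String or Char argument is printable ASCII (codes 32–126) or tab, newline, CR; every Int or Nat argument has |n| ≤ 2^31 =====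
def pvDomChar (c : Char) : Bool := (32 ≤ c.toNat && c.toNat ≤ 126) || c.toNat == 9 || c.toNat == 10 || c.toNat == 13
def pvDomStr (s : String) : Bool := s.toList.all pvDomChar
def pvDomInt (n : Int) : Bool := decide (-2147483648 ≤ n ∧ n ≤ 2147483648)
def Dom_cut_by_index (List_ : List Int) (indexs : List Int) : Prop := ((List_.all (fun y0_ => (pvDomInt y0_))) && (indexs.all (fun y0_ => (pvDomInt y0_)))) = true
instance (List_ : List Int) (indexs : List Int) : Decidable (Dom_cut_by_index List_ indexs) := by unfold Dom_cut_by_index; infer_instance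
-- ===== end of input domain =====

-- B replaces A's accumulator/flush state machine with a skip-delimiter / take-maximal-run scan (alternative decomposition, same cost).

-- ===== PORT A =====
-- loop body of A's for-loop (state = (inds, ind), element = (i, l))
def pvStepA (indexs : List Int) (length : Int) (s : List (List Int) × List Int)
    (p : Int × Int) : List (List Int) × List Int :=
  if ¬ (p.2 ∈ indexs) then
    let ind' := s.2 ++ [p.2]
    (if p.1 = length - 1 then s.1 ++ [ind'] else s.1, ind')
  else
    (if s.2 ≠ [] then s.1 ++ [s.2] else s.1, [])

def cut_by_index (List_ : List Int) (indexs : List Int) : List (List Int) :=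
  let length : Int := List_.length
  ((PySem.List.enumerate List_).foldl (pvStepA indexs length) ([], [])).1

-- ===== PORT B =====
-- inner while-loop of Source B: peel the maximal non-delimiter run off the front; returns (seg, rest)
def pvSpan (indexs : List Int) : List Int → List Int × List Int
  | [] => ([], [])
  | x :: xs =>
    if x ∈ indexs then ([], x :: xs)
    else
      let p := pvSpan indexs xs
      (x :: p.1, p.2)

theorem pvSpan_snd_length_le (indexs : List Int) (xs : List Int) :
    (pvSpan indexs xs).2.length ≤ xs.length := by
  induction xs with
  | nil => simp [pvSpan]
  | cons x xs ih =>
    simp only [pvSpan]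
    split
    · simp
    · simpa using Nat.le_succ_of_le ih

-- outer while-loop of Source B
def pvGoB (indexs : List Int) : List Int → List (List Int)
  | [] => []
  | x :: xs =>
    if x ∈ indexs then pvGoB indexs xs
    else
      let p := pvSpan indexs (x :: xs)
      p.1 :: pvGoB indexs p.2
termination_by l => l.length
decreasing_by
  · simp
  · simp only [pvSpan, if_neg (by assumption)]
    exact Nat.lt_succ_of_le (pvSpan_snd_length_le indexs xs)

def cut_by_index_alt (List_ : List Int) (indexs : List Int) : List (List Int) :=
  pvGoB indexs List_

-- ===== PRECONDITION & SPEC =====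
def Spec_cut_by_index (List_ : List Int) (indexs : List Int) (out : List (List Int)) : Prop := out = cut_by_index_alt List_ indexs
instance (List_ : List Int) (indexs : List Int) (out : List (List Int)) : Decidable (Spec_cut_by_index List_ indexs out) := by unfold Spec_cut_by_index; infer_instance

-- ===== CLAIM (what is proved, stated in full; the proofs are below) =====
def Claim_equal_cut_by_index : Prop := ∀ (List_ : List Int) (indexs : List Int), Dom_cut_by_index List_ indexs → Spec_cut_by_index List_ indexs (cut_by_index List_ indexs)

-- ===== LEMMAS AND PROOFS =====

-- the contribution A's loop still adds after state (·, ind) on remaining input xs,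
-- where "xs = []" stands for A's "i == length - 1" test
def pvG (indexs : List Int) : List Int → List Int → List (List Int)
  | _, [] => []
  | ind, x :: xs =>
    if x ∈ indexs then (if ind ≠ [] then [ind] else []) ++ pvG indexs [] xs
    else (if xs = [] then [ind ++ [x]] else []) ++ pvG indexs (ind ++ [x]) xs

theorem pvG_fold (indexs : List Int) (len : Int) (xs : List Int) :
    ∀ (s : Int) (inds : List (List Int)) (ind : List Int),
      s + (xs.length : Int) = len →
      ((PySem.List.enumerate xs s).foldl (pvStepA indexs len) (inds, ind)).1
        = inds ++ pvG indexs ind xs := by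
  induction xs with
  | nil => intro s inds ind _; simp [PySem.List.enumerate_nil, pvG]
  | cons x xs ih =>
    intro s inds ind h
    have h' : s + (xs.length : Int) + 1 = len := by
      simp only [List.length_cons] at h; push_cast at h ⊢; omega
    rw [PySem.List.enumerate_cons]
    simp only [List.foldl_cons]
    by_cases hx : x ∈ indexs
    · rw [show pvStepA indexs len (inds, ind) (s, x)
            = ((if ind ≠ [] then inds ++ [ind] else inds), []) by
          simp [pvStepA, hx]]
      rw [ih (s + 1) _ [] (by omega)]
      simp only [pvG, if_pos hx]
      split <;> simp
    · have hcond : (s = len - 1) = (xs = []) := by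
        simp only [eq_iff_iff]
        constructor
        · intro hs
          have : (xs.length : Int) = 0 := by omega
          simpa using List.eq_nil_of_length_eq_zero (by exact_mod_cast this)
        · intro hxs; subst hxs; simp at h'; omega
      rw [show pvStepA indexs len (inds, ind) (s, x)
            = ((if s = len - 1 then inds ++ [ind ++ [x]] else inds), ind ++ [x]) by
          simp [pvStepA, hx]]
      rw [ih (s + 1) _ (ind ++ [x]) (by omega)]
      simp only [pvG, if_neg hx, hcond]
      split <;> simp

-- pvG with empty pending segment is B's outer loop; with nonempty pending it merges
-- the pending segment with the leading run
theorem pvG_eq_goB (indexs : List Int) (xs : List Int) :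
    pvG indexs [] xs = pvGoB indexs xs ∧
    (∀ ind : List Int, ind ≠ [] →
      pvG indexs ind xs =
        if xs = [] then []
        else (ind ++ (pvSpan indexs xs).1) :: pvGoB indexs (pvSpan indexs xs).2) := by
  induction xs with
  | nil => exact ⟨by simp [pvG, pvGoB], fun ind _ => by simp [pvG]⟩
  | cons x xs ih =>
    obtain ⟨ih1, ih2⟩ := ih
    by_cases hx : x ∈ indexs
    · constructor
      · simp [pvG, pvGoB, hx, ih1]
      · intro ind hind
        simp [pvG, pvGoB, pvSpan, hx, hind, ih1]
    · have key : ∀ ind : List Int,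
          pvG indexs ind (x :: xs) =
            (ind ++ (pvSpan indexs (x :: xs)).1) :: pvGoB indexs (pvSpan indexs (x :: xs)).2 := by
        intro ind
        simp only [pvG, if_neg hx, pvSpan]
        rcases eq_or_ne xs [] with hxs | hxs
        · subst hxs; simp [pvG, pvSpan, pvGoB]
        · rw [ih2 (ind ++ [x]) (by simp)]
          simp [hxs]
      refine ⟨?_, fun ind _ => by rw [key ind, if_neg (by simp)]⟩
      rw [key []]
      simp only [List.nil_append]
      rw [pvGoB]
      simp [hx]

-- ===== VERDICT (by name: the statement is the Claim_ definition above) =====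
theorem cut_by_index_spec : Claim_equal_cut_by_index := by
  intro List_ indexs _
  unfold Spec_cut_by_index cut_by_index cut_by_index_alt
  rw [pvG_fold indexs (List_.length : Int) List_ 0 [] [] (by simp)]
  simpa using (pvG_eq_goB indexs List_).1
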